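-- pv_equiv track=rewrite | github.com/antantilope/freecodecamp-challenges | python/Intermediate-Algorithm-Scripting/convertHTMLEntities.py | convertHTML
-- ===== SOURCE A (Python) =====
-- def convertHTML(string):
--     replace = {
--       '>': '&gt;',
--       '<': '&lt;',
--       "'":  '&apos;',
--       '"': '&quot;',
--       '&': '&amp;',
--     }
--     return ''.join(replace.get(c, c) for c in string)
-- ===== SOURCE B (Python) =====
-- def convertHTML(string):
--     # '&' must be replaced first so entities introduced later are not re-escaped.
--     return (string.replace('&', '&amp;')
--                   .replace('>', '&gt;')
--                   .replace('<', '&lt;')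
--                   .replace("'", '&apos;')
--                   .replace('"', '&quot;'))
-- ===== Notes on version B (the rewrite author's own statement) =====
-- stated objective: faster
-- what changed: Replaces the per-character dict-lookup generator join with five chained str.replace passes (ampersand first to avoid double-escaping); str.replace runs in C instead of a Python-level loop.
import Mathlib
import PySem

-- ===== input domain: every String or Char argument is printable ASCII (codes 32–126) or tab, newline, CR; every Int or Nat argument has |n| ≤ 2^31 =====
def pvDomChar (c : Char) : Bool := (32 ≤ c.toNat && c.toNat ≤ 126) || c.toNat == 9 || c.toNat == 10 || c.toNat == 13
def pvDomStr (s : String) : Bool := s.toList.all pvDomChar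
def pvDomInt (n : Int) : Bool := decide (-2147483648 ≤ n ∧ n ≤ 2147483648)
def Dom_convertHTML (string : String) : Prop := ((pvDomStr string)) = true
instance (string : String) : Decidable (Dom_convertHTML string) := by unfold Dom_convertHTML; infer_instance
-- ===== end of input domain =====

-- B replaces A's per-character dict-lookup join with five chained str.replace passes ('&' first); same return value, idiomatic rewrite.

-- ===== PORT A =====
def convertHTML (string : String) : String :=
  let replace : PySem.Dict String String :=
    PySem.Dict.ofList [(">", "&gt;"), ("<", "&lt;"), ("'", "&apos;"), ("\"", "&quot;"), ("&", "&amp;")]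
  PySem.Str.join "" (string.toList.map (fun c =>
    PySem.Dict.getD replace (String.ofList [c]) (String.ofList [c])))

-- ===== PORT B =====
def convertHTML_alt (string : String) : String :=
  PySem.Str.replace
    (PySem.Str.replace
      (PySem.Str.replace
        (PySem.Str.replace
          (PySem.Str.replace string "&" "&amp;")
          ">" "&gt;")
        "<" "&lt;")
      "'" "&apos;")
    "\"" "&quot;"

-- ===== PRECONDITION & SPEC =====
def Spec_convertHTML (string : String) (out : String) : Prop := out = convertHTML_alt string
instance (string : String) (out : String) : Decidable (Spec_convertHTML string out) := by unfold Spec_convertHTML; infer_instance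

-- ===== CLAIM (what is proved, stated in full; the proofs are below) =====
def Claim_equal_convertHTML : Prop := ∀ (string : String), Dom_convertHTML string → Spec_convertHTML string (convertHTML string)

-- ===== LEMMAS AND PROOFS =====

-- substitution of one character by a string, as a per-character function
def subst1 (a : Char) (new : List Char) (c : Char) : List Char :=
  if c = a then new else [c]

-- A's per-character mapping (the dict lookup, as a function on chars)
def mapA (c : Char) : List Char :=
  if c = '>' then "&gt;".toList
  else if c = '<' then "&lt;".toList
  else if c = '\'' then "&apos;".toList
  else if c = '"' then "&quot;".toList
  else if c = '&' then "&amp;".toList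
  else [c]

theorem replace_go_single (a : Char) (new : List Char) :
    ∀ (fuel : Nat) (l acc : List Char), l.length ≤ fuel →
      PySem.Chars.replace.go [a] new fuel l acc
        = acc.reverse ++ l.flatMap (subst1 a new) := by
  intro fuel
  induction fuel with
  | zero =>
    intro l acc h
    have : l = [] := List.eq_nil_of_length_eq_zero (Nat.le_zero.mp h)
    subst this
    simp [PySem.Chars.replace.go]
  | succ n ih =>
    intro l acc h
    cases l with
    | nil => simp [PySem.Chars.replace.go]
    | cons c t =>
      simp only [PySem.Chars.replace.go]
      by_cases hc : c = a
      · subst hc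
        have hpre : List.isPrefixOf [c] (c :: t) = true := by
          simp [List.isPrefixOf]
        rw [if_pos hpre, show List.drop [c].length (c :: t) = t from rfl]
        rw [ih t _ (by simpa using Nat.succ_le_succ_iff.mp h)]
        simp [subst1]
      · have hpre : List.isPrefixOf [a] (c :: t) = false := by
          simp [List.isPrefixOf]
          exact fun hh => (hc hh.symm).elim
        rw [if_neg (by simp [hpre])]
        rw [ih t _ (Nat.succ_le_succ_iff.mp h)]
        simp [subst1, hc]

theorem replace_single (a : Char) (new l : List Char) :
    PySem.Chars.replace l [a] new = l.flatMap (subst1 a new) := by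
  rw [PySem.Chars.replace]
  simp only [List.isEmpty_cons, Bool.false_eq_true, if_false]
  exact replace_go_single a new l.length l [] (le_refl _)

-- the composition of B's five per-character substitutions equals A's mapping
theorem comp_eq_mapA (c : Char) :
    List.flatMap
      (fun x =>
        List.flatMap
          (fun x =>
            List.flatMap (fun x => List.flatMap (subst1 '"' "&quot;".toList) (subst1 '\'' "&apos;".toList x))
              (subst1 '<' "&lt;".toList x))
          (subst1 '>' "&gt;".toList x))
      (subst1 '&' "&amp;".toList c) = mapA c := by
  by_cases h1 : c = '&'
  · subst h1; decide
  by_cases h2 : c = '>'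
  · subst h2; decide
  by_cases h3 : c = '<'
  · subst h3; decide
  by_cases h4 : c = '\''
  · subst h4; decide
  by_cases h5 : c = '"'
  · subst h5; decide
  simp [subst1, mapA, h1, h2, h3, h4, h5]

theorem alt_toList (s : String) :
    (convertHTML_alt s).toList = s.toList.flatMap mapA := by
  simp only [convertHTML_alt, PySem.Str.replace, String.toList_ofList]
  rw [show ("&".toList) = ['&'] from rfl, show (">".toList) = ['>'] from rfl,
      show ("<".toList) = ['<'] from rfl, show ("'".toList) = ['\''] from rfl,
      show ("\"".toList) = ['"'] from rfl]
  rw [replace_single, replace_single, replace_single, replace_single, replace_single]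
  rw [List.flatMap_assoc, List.flatMap_assoc, List.flatMap_assoc, List.flatMap_assoc]
  exact List.flatMap_congr (fun c _ => comp_eq_mapA c)

-- A's dict lookup on a single-character key is mapA
theorem dict_lookup (c : Char) :
    PySem.Dict.getD
      (PySem.Dict.ofList [(">", "&gt;"), ("<", "&lt;"), ("'", "&apos;"), ("\"", "&quot;"), ("&", "&amp;")])
      (String.ofList [c]) (String.ofList [c]) = String.ofList (mapA c) := by
  by_cases h1 : c = '>'
  · subst h1; decide
  by_cases h2 : c = '<'
  · subst h2; decide
  by_cases h3 : c = '\''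
  · subst h3; decide
  by_cases h4 : c = '"'
  · subst h4; decide
  by_cases h5 : c = '&'
  · subst h5; decide
  have key : ∀ (d : Char) (t : String), t.toList = [d] → ¬ c = d → ((t == String.ofList [c]) = false) := by
    intro d t ht h
    simp only [beq_eq_false_iff_ne, ne_eq]
    intro hh
    apply h
    have := congrArg String.toList hh
    simp [ht] at this
    exact this.symm
  rw [show mapA c = [c] by simp [mapA, h1, h2, h3, h4, h5]]
  simp only [PySem.Dict.getD, PySem.Dict.get?, PySem.Dict.ofList]
  rw [show (PySem.Dict.empty.update [((">":String), ("&gt;":String)), ("<", "&lt;"), ("'", "&apos;"), ("\"", "&quot;"), ("&", "&amp;")]).items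
      = [((">":String), ("&gt;":String)), ("<", "&lt;"), ("'", "&apos;"), ("\"", "&quot;"), ("&", "&amp;")] from rfl]
  simp [List.find?, key '>' ">" rfl h1, key '<' "<" rfl h2, key '\'' "'" rfl h3,
        key '"' "\"" rfl h4, key '&' "&" rfl h5]

-- ''.join over a map is flatMap
theorem join_map_flatMap (cs : List Char) (f : Char → List Char) :
    PySem.Chars.join [] (cs.map f) = cs.flatMap f := by
  induction cs with
  | nil => rfl
  | cons c t ih =>
    cases t with
    | nil => simp [PySem.Chars.join_singleton [] (f c)]
    | cons d u =>
      rw [List.map_cons, List.map_cons, PySem.Chars.join_cons_cons]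
      simp at ih ⊢
      simpa using ih

theorem a_toList (s : String) :
    (convertHTML s).toList = s.toList.flatMap mapA := by
  simp only [convertHTML, PySem.Str.toList_join]
  rw [show ("" : String).toList = [] from rfl]
  simp only [List.map_map]
  rw [show ((fun s : String => s.toList) ∘ fun c =>
        PySem.Dict.getD
          (PySem.Dict.ofList [(">", "&gt;"), ("<", "&lt;"), ("'", "&apos;"), ("\"", "&quot;"), ("&", "&amp;")])
          (String.ofList [c]) (String.ofList [c]))
      = fun c => mapA c from funext fun c => by
        simp only [Function.comp, dict_lookup, String.toList_ofList]]
  rw [show (s.toList.map fun c => mapA c) = s.toList.map mapA from rfl]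
  exact join_map_flatMap s.toList mapA

-- ===== VERDICT (by name: the statement is the Claim_ definition above) =====
theorem convertHTML_spec : Claim_equal_convertHTML := by
  intro s _
  unfold Spec_convertHTML
  have := (a_toList s).trans (alt_toList s).symm
  exact String.toList_inj.mp this
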